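-- pv_equiv track=rewrite | github.com/youngeun-dev/coding-test-practice | python/석유-시추.py | solution
-- ===== SOURCE A (Python) =====
-- from collections import deque
--
-- OIL = 1
--
-- def solution(land):
--     # 세로, 가로
--     n, m = len(land), len(land[0])
--
--     # 시추관 위치별 석유량
--     oils = [0] * m
--
--     # 방문 확인
--     visited = [[False] * m for _ in range(n)]
--
--     # bfs - 석유 덩어리 탐색
--     def bfs(x, y, left, right):
--         q = deque([(x, y)])
--         visited[x][y] = True
--         oil = OIL
--         while q:
--             x, y = q.popleft()
--             for dx, dy in [(0, 1), (1, 0), (0, -1), (-1, 0)]: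
--                 nx, ny = x + dx, y + dy
--                 if 0 <= nx < n and 0 <= ny < m:
--                     if not visited[nx][ny] and land[nx][ny] == OIL:
--                         visited[nx][ny] = True
--                         oil += OIL
--                         left, right = min(left, ny), max(right, ny)
--                         q.append((nx, ny))
--         # 포함되는 열에 석유 덩어리값 추가
--         for i in range(left, right + 1):
--             oils[i] += oil
--
--     for x in range(n):
--         for y in range(m):
--             if not visited[x][y] and land[x][y] == OIL:
--                 bfs(x, y, y, y)
--
--     return max(oils)
-- ===== SOURCE B (Python) =====
-- def solution(land):
--     # Per-drill-column multi-source flood fill: for each column, count the oil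
--     # reachable from that column's oil cells; the answer is the best column.
--     n, m = len(land), len(land[0])
--     best = 0
--     for col in range(m):
--         seen = set()
--         stack = []
--         for row in range(n):
--             if land[row][col] == 1:
--                 seen.add((row, col))
--                 stack.append((row, col))
--         count = len(stack)
--         while stack:
--             x, y = stack.pop()
--             for nx, ny in ((x - 1, y), (x + 1, y), (x, y - 1), (x, y + 1)):
--                 if 0 <= nx < n and 0 <= ny < m and (nx, ny) not in seen and land[nx][ny] == 1:
--                     seen.add((nx, ny))
--                     count += 1
--                     stack.append((nx, ny))
--         if count > best:
--             best = count
--     return best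
-- ===== Notes on version B (the rewrite author's own statement) =====
-- stated objective: alternative
-- what changed: Instead of flooding each oil component once and spreading its size over the columns of its span, B answers per drill column: for each column it runs one multi-source flood fill seeded by that column's oil cells and counts the reachable oil (correct because a 4-connected component spans an interval of columns, so it touches a column iff the column lies in its span), taking the running max; no oils array, no per-component span bookkeeping.
import Mathlib
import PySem

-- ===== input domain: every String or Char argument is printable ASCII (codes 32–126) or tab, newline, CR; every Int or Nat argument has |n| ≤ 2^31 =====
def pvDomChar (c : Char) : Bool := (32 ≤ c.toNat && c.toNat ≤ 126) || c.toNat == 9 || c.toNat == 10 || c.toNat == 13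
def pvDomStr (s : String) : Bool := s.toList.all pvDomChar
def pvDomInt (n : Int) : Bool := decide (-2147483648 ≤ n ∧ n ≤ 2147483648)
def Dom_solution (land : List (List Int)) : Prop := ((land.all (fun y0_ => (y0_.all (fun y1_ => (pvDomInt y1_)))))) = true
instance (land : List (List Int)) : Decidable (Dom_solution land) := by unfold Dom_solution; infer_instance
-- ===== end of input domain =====

-- B answers per drill column instead of per oil component: for each column it runs one
-- multi-source flood fill seeded by that column's oil cells and counts the reachable oil
-- (a 4-connected component touches a column iff the column lies in its span), taking a
-- running max (objective: alternative).

-- ===== PORT A =====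
-- land[i][j]: A only reads it behind a 0 ≤ · < n/m bounds guard, so the
-- defaults of pyGetD are never read on guarded accesses (exact there).
def pvGet (land : List (List Int)) (i j : Int) : Int :=
  PySem.List.pyGetD (PySem.List.pyGetD land i []) j 0

-- visited[a][b] = True  (functional update of the Boolean visited matrix)
def pvMark (v : Int → Int → Bool) (a b : Int) : Int → Int → Bool :=
  fun i j => if i = a ∧ j = b then true else v i j

-- inner 'for dx, dy in [(0,1),(1,0),(0,-1),(-1,0)]' of A's bfs: marks, appends to the
-- queue's end (deque.append) and updates oil/left/right at push time
def bfsNbrs (land : List (List Int)) (n m x y : Int) :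
    List (Int × Int) → (Int → Int → Bool) → List (Int × Int) → Int → Int → Int →
      (Int → Int → Bool) × List (Int × Int) × Int × Int × Int
  | [], v, q, oil, l, r => (v, q, oil, l, r)
  | (dx, dy) :: ds, v, q, oil, l, r =>
    let nx := x + dx
    let ny := y + dy
    if (0 ≤ nx ∧ nx < n ∧ 0 ≤ ny ∧ ny < m) ∧ v nx ny = false ∧ pvGet land nx ny = 1 then
      bfsNbrs land n m x y ds (pvMark v nx ny) (q ++ [(nx, ny)]) (oil + 1) (min l ny) (max r ny)
    else
      bfsNbrs land n m x y ds v q oil l r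

-- 'while q:' of A's bfs, popleft from the head; the fuel counter only makes the
-- unbounded Python loop structurally recursive (n*m+1 is proved sufficient below)
def bfsLoop (land : List (List Int)) (n m : Int) :
    Nat → List (Int × Int) → (Int → Int → Bool) → Int → Int → Int →
      (Int → Int → Bool) × Int × Int × Int
  | 0, _, v, oil, l, r => (v, oil, l, r)
  | _ + 1, [], v, oil, l, r => (v, oil, l, r)
  | fuel + 1, (x, y) :: rest, v, oil, l, r =>
    let st := bfsNbrs land n m x y [(0, 1), (1, 0), (0, -1), (-1, 0)] v rest oil l r
    bfsLoop land n m fuel st.2.1 st.1 st.2.2.1 st.2.2.2.1 st.2.2.2.2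

-- body of A's nested 'for x … for y …': bfs(x, y, y, y) then
-- 'for i in range(left, right + 1): oils[i] += oil'
def bfsCellA (land : List (List Int)) (n m : Int)
    (st : (Int → Int → Bool) × List Int) (x y : Int) : (Int → Int → Bool) × List Int :=
  if st.1 x y = false ∧ pvGet land x y = 1 then
    let out := bfsLoop land n m ((n * m).toNat + 1) [(x, y)] (pvMark st.1 x y) 1 y y
    (out.1,
     (PySem.List.pyRange out.2.2.1 (out.2.2.2 + 1) 1).foldl
       (fun os i => PySem.List.pySetD os i (PySem.List.pyGetD os i 0 + out.2.1)) st.2)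
  else st

def solution (land : List (List Int)) : Int :=
  let n : Int := land.length
  let m : Int := (PySem.List.pyGetD land 0 []).length   -- len(land[0]); land ≠ [] under Pre_
  let fin := (PySem.List.pyRange 0 n 1).foldl
      (fun st x => (PySem.List.pyRange 0 m 1).foldl (fun st y => bfsCellA land n m st x y) st)
      (fun _ _ => false, List.replicate m.toNat 0)
  (PySem.List.max? fin.2 (fun z => z)).getD 0   -- max(oils); oils ≠ [] under Pre_

-- ===== PORT B =====
-- 'for row in range(n): if land[row][col] == 1: seen.add(...); stack.append(...)';
-- the Python stack's top is the list end, modelled by the Lean list head, so append = cons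
def seedCol (land : List (List Int)) (n col : Int) :
    PySem.Set (Int × Int) × List (Int × Int) :=
  (PySem.List.pyRange 0 n 1).foldl
    (fun st row =>
      if PySem.List.pyGetD (PySem.List.pyGetD land row []) col 0 = 1 then
        (PySem.Set.add st.1 (row, col), (row, col) :: st.2)
      else st)
    (PySem.Set.empty, [])

-- inner 'for nx, ny in ((x-1,y),(x+1,y),(x,y-1),(x,y+1))': membership test in the seen
-- set, then add + push + count at push time
def floodPush (land : List (List Int)) (n m : Int) :
    List (Int × Int) → PySem.Set (Int × Int) × List (Int × Int) × Int →
      PySem.Set (Int × Int) × List (Int × Int) × Int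
  | [], st => st
  | (nx, ny) :: cs, (seen, stk, cnt) =>
    if (0 ≤ nx ∧ nx < n ∧ 0 ≤ ny ∧ ny < m) ∧ PySem.Set.contains seen (nx, ny) = false ∧
        PySem.List.pyGetD (PySem.List.pyGetD land nx []) ny 0 = 1 then
      floodPush land n m cs (PySem.Set.add seen (nx, ny), (nx, ny) :: stk, cnt + 1)
    else floodPush land n m cs (seen, stk, cnt)

-- 'while stack:' with stack.pop(); fuel only makes the loop structurally recursive
def floodLoop (land : List (List Int)) (n m : Int) :
    Nat → PySem.Set (Int × Int) → List (Int × Int) → Int → Int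
  | 0, _, _, cnt => cnt
  | _ + 1, _, [], cnt => cnt
  | fuel + 1, seen, (x, y) :: rest, cnt =>
    let st := floodPush land n m [(x - 1, y), (x + 1, y), (x, y - 1), (x, y + 1)]
      (seen, rest, cnt)
    floodLoop land n m fuel st.1 st.2.1 st.2.2

def solution_alt (land : List (List Int)) : Int :=
  let n : Int := land.length
  let m : Int := (PySem.List.pyGetD land 0 []).length
  (PySem.List.pyRange 0 m 1).foldl
    (fun best col =>
      let sd := seedCol land n col
      let count := floodLoop land n m ((n * m).toNat + 1) sd.1 sd.2 (sd.2.length : Int)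
      if best < count then count else best)
    0

-- ===== PRECONDITION & SPEC =====
-- Pre_ excludes exactly the inputs where Python A raises: an empty grid (IndexError on
-- the first-row lookup), an empty first row (ValueError: max of an empty list), and
-- grids with a row shorter than the first row (IndexError: the outer loop indexes
-- every cell up to the first row's width).
def Pre_solution (land : List (List Int)) : Prop :=
  land ≠ [] ∧ land.headD [] ≠ [] ∧ ∀ r ∈ land, (land.headD []).length ≤ r.length
instance (land : List (List Int)) : Decidable (Pre_solution land) := by
  unfold Pre_solution; infer_instance

def pvWitness_solution : List (List Int) := [[1, 0], [1, 1]]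

def Spec_solution (land : List (List Int)) (out : Int) : Prop := out = solution_alt land
instance (land : List (List Int)) (out : Int) : Decidable (Spec_solution land out) := by
  unfold Spec_solution; infer_instance

-- ===== CLAIM (what is proved, stated in full; the proofs are below) =====
def Claim_equal_solution : Prop :=
  ∀ (land : List (List Int)), Dom_solution land → Pre_solution land →
    Spec_solution land (solution land)

-- ===== LEMMAS AND PROOFS =====

-- the in-grid cells
def InG (n m : Int) (c : Int × Int) : Prop := 0 ≤ c.1 ∧ c.1 < n ∧ 0 ≤ c.2 ∧ c.2 < m

-- the four-neighbour relation, in exactly the orientation A's and B's loops test it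
def Nbr (a b : Int × Int) : Prop :=
  b = (a.1, a.2 + 1) ∨ b = (a.1 + 1, a.2) ∨ b = (a.1, a.2 - 1) ∨ b = (a.1 - 1, a.2)

-- one admissible search step from a towards b (b a fresh in-grid oil cell adjacent to a)
def StepR (land : List (List Int)) (n m : Int) (v : Int → Int → Bool)
    (a b : Int × Int) : Prop :=
  Nbr a b ∧ InG n m b ∧ pvGet land b.1 b.2 = 1 ∧ v b.1 b.2 = false

-- the not-yet-visited cells a running search with frontier q will still visit
def NR (land : List (List Int)) (n m : Int) (v : Int → Int → Bool)
    (q : List (Int × Int)) : Set (Int × Int) :=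
  {c | v c.1 c.2 = false ∧ ∃ f ∈ q, Relation.ReflTransGen (StepR land n m v) f c}

def markList (v : Int → Int → Bool) (cs : List (Int × Int)) : Int → Int → Bool :=
  cs.foldl (fun w c => pvMark w c.1 c.2) v

-- the eligibility test both inner loops apply to a candidate cell
def pvOk (land : List (List Int)) (n m : Int) (v : Int → Int → Bool)
    (c : Int × Int) : Bool :=
  decide ((0 ≤ c.1 ∧ c.1 < n ∧ 0 ≤ c.2 ∧ c.2 < m) ∧ v c.1 c.2 = false ∧
    pvGet land c.1 c.2 = 1)

-- number of unvisited grid cells (the loops' termination measure)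
def unvis (n m : Int) (v : Int → Int → Bool) : Nat :=
  ((Finset.range n.toNat ×ˢ Finset.range m.toNat).filter
    (fun c => v (c.1 : Int) (c.2 : Int) = false)).card

-- characterisation of a running minimum / maximum seeded with l0 over the columns of S
def MinC (S : Set (Int × Int)) (l0 lf : Int) : Prop :=
  lf ≤ l0 ∧ (∀ c ∈ S, lf ≤ c.2) ∧ (lf = l0 ∨ ∃ c ∈ S, lf = c.2)
def MaxC (S : Set (Int × Int)) (r0 rf : Int) : Prop :=
  r0 ≤ rf ∧ (∀ c ∈ S, c.2 ≤ rf) ∧ (rf = r0 ∨ ∃ c ∈ S, rf = c.2)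

theorem pvMark_ne (v : Int → Int → Bool) (a b i j : Int) (h : (i, j) ≠ (a, b)) :
    pvMark v a b i j = v i j := by
  unfold pvMark
  rw [if_neg]
  intro hc
  exact h (by simp [hc.1, hc.2])

theorem markList_spec (v : Int → Int → Bool) (cs : List (Int × Int)) (i j : Int) :
    markList v cs i j = true ↔ (v i j = true ∨ (i, j) ∈ cs) := by
  induction cs generalizing v with
  | nil => simp [markList]
  | cons c cs ih =>
    have : markList v (c :: cs) = markList (pvMark v c.1 c.2) cs := rfl
    rw [this, ih]
    by_cases h : (i, j) = c
    · subst h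
      simp [pvMark]
    · rw [pvMark_ne v c.1 c.2 i j (by simpa using h)]
      simp only [List.mem_cons]
      tauto

theorem filter_pvOk_mark (land : List (List Int)) (n m : Int) (v : Int → Int → Bool)
    (c : Int × Int) (cs : List (Int × Int)) (h : ∀ c' ∈ cs, c' ≠ c) :
    cs.filter (pvOk land n m (pvMark v c.1 c.2)) = cs.filter (pvOk land n m v) := by
  apply List.filter_congr
  intro x hx
  have hne : (x.1, x.2) ≠ (c.1, c.2) := by
    intro hc
    exact h x hx (by simpa [Prod.ext_iff] using hc)
  unfold pvOk
  rw [pvMark_ne v c.1 c.2 x.1 x.2 hne]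

theorem bfsNbrs_spec (land : List (List Int)) (n m x y : Int) (ds : List (Int × Int))
    (v : Int → Int → Bool) (q : List (Int × Int)) (oil l r : Int)
    (hd : (ds.map (fun d => (x + d.1, y + d.2))).Pairwise (· ≠ ·)) :
    bfsNbrs land n m x y ds v q oil l r =
      (markList v ((ds.map (fun d => (x + d.1, y + d.2))).filter (pvOk land n m v)),
       q ++ (ds.map (fun d => (x + d.1, y + d.2))).filter (pvOk land n m v),
       oil + ((ds.map (fun d => (x + d.1, y + d.2))).filter (pvOk land n m v)).length,
       (((ds.map (fun d => (x + d.1, y + d.2))).filter (pvOk land n m v)).map (·.2)).foldl min l,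
       (((ds.map (fun d => (x + d.1, y + d.2))).filter (pvOk land n m v)).map (·.2)).foldl max r) := by
  induction ds generalizing v q oil l r with
  | nil => simp [bfsNbrs, markList]
  | cons d ds ih =>
    simp only [List.map_cons, List.pairwise_cons] at hd
    obtain ⟨hne, hd'⟩ := hd
    show bfsNbrs land n m x y (d :: ds) v q oil l r = _
    rw [bfsNbrs]
    by_cases hc : (0 ≤ x + d.1 ∧ x + d.1 < n ∧ 0 ≤ y + d.2 ∧ y + d.2 < m) ∧
        v (x + d.1) (y + d.2) = false ∧ pvGet land (x + d.1) (y + d.2) = 1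
    · rw [if_pos hc, ih _ _ _ _ _ hd']
      have hok : pvOk land n m v (x + d.1, y + d.2) = true := by
        simp [pvOk]; tauto
      have hfe := filter_pvOk_mark land n m v (x + d.1, y + d.2)
        (ds.map (fun d => (x + d.1, y + d.2)))
        (fun c' hc' => (hne c' hc').symm)
      rw [hfe]
      conv_rhs => rw [List.map_cons, List.filter_cons_of_pos hok]
      simp only [Prod.mk.injEq, List.foldl_cons, List.length_cons, List.map_cons]
      exact ⟨rfl, by simp, by push_cast; ring, trivial⟩
    · rw [if_neg hc, ih _ _ _ _ _ hd']
      have hok : pvOk land n m v (x + d.1, y + d.2) = false := by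
        simp only [pvOk, decide_eq_false_iff_not]
        tauto
      simp [hok]

theorem markList_false_iff (v : Int → Int → Bool) (cs : List (Int × Int)) (i j : Int) :
    markList v cs i j = false ↔ (v i j = false ∧ (i, j) ∉ cs) := by
  rw [← Bool.not_eq_true, markList_spec]
  simp [not_or]

theorem markList_true_of_true (v : Int → Int → Bool) (cs : List (Int × Int)) (i j : Int)
    (h : v i j = true) : markList v cs i j = true := (markList_spec v cs i j).mpr (Or.inl h)

theorem markList_true_of_mem (v : Int → Int → Bool) (cs : List (Int × Int)) (c : Int × Int)
    (h : c ∈ cs) : markList v cs c.1 c.2 = true :=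
  (markList_spec v cs c.1 c.2).mpr (Or.inr (by simpa using h))

theorem StepR_of_mark (land : List (List Int)) (n m : Int) (v : Int → Int → Bool)
    (N : List (Int × Int)) (a b : Int × Int)
    (h : StepR land n m (markList v N) a b) : StepR land n m v a b := by
  obtain ⟨h1, h2, h3, h4⟩ := h
  exact ⟨h1, h2, h3, ((markList_false_iff v N b.1 b.2).mp h4).1⟩

theorem NR_nil (land : List (List Int)) (n m : Int) (v : Int → Int → Bool) :
    NR land n m v [] = ∅ := by
  ext c; simp [NR]

theorem NR_of_mem_iff (land : List (List Int)) (n m : Int) (v : Int → Int → Bool)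
    (q q' : List (Int × Int)) (h : ∀ c, c ∈ q ↔ c ∈ q') :
    NR land n m v q = NR land n m v q' := by
  ext c
  constructor
  · rintro ⟨hv, f, hf, hp⟩; exact ⟨hv, f, (h f).mp hf, hp⟩
  · rintro ⟨hv, f, hf, hp⟩; exact ⟨hv, f, (h f).mpr hf, hp⟩

theorem NR_mem_InG (land : List (List Int)) (n m : Int) (v : Int → Int → Bool)
    (q : List (Int × Int)) (hq : ∀ c ∈ q, v c.1 c.2 = true) :
    ∀ c ∈ NR land n m v q, InG n m c := by
  rintro c ⟨hv, f, hf, hp⟩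
  rcases Relation.ReflTransGen.cases_tail hp with heq | ⟨b, _, hstep⟩
  · subst heq
    rw [hq c hf] at hv
    exact absurd hv (by simp)
  · exact hstep.2.1

theorem grid_finite (n m : Int) : ({c : Int × Int | InG n m c}).Finite := by
  apply (Set.finite_Icc ((0 : Int), (0 : Int)) (n - 1, m - 1)).subset
  rintro ⟨a, b⟩ ⟨h1, h2, h3, h4⟩
  simp only [Set.mem_Icc, Prod.le_def]
  refine ⟨⟨h1, h3⟩, by simp; omega, by simp; omega⟩

theorem NR_finite (land : List (List Int)) (n m : Int) (v : Int → Int → Bool)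
    (q : List (Int × Int)) (hq : ∀ c ∈ q, v c.1 c.2 = true) :
    (NR land n m v q).Finite :=
  (grid_finite n m).subset (fun c hc => NR_mem_InG land n m v q hq c hc)

-- the central exchange lemma: expanding the head p of the frontier moves exactly its
-- eligible fresh neighbours N out of the still-to-visit set
theorem NR_step (land : List (List Int)) (n m : Int) (v : Int → Int → Bool)
    (p : Int × Int) (rest N : List (Int × Int))
    (hq : ∀ c ∈ (p :: rest), v c.1 c.2 = true)
    (hN : ∀ c, c ∈ N ↔ StepR land n m v p c) :
    NR land n m v (p :: rest) =
      {c | c ∈ N} ∪ NR land n m (markList v N) (rest ++ N) := by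
  ext c
  constructor
  · rintro ⟨hv, f, hf, hp⟩
    revert hv
    induction hp with
    | refl =>
      intro hv
      rw [hq _ hf] at hv
      exact absurd hv (by simp)
    | @tail b c hab hbc ih =>
      intro hvc
      by_cases hcN : c ∈ N
      · exact Or.inl hcN
      · have hv'c : markList v N c.1 c.2 = false :=
          (markList_false_iff v N c.1 c.2).mpr ⟨hvc, by simpa using hcN⟩
        by_cases hb : v b.1 b.2 = false
        · rcases ih hb with hbN | ⟨hbv', g, hg, hpath⟩
          · exact Or.inr ⟨hv'c, b, List.mem_append_right rest hbN,
              Relation.ReflTransGen.single ⟨hbc.1, hbc.2.1, hbc.2.2.1, hv'c⟩⟩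
          · exact Or.inr ⟨hv'c, g, hg, hpath.tail ⟨hbc.1, hbc.2.1, hbc.2.2.1, hv'c⟩⟩
        · have hbf : b = f := by
            rcases Relation.ReflTransGen.cases_tail hab with heq | ⟨mid, _, hstep⟩
            · exact heq
            · exact absurd hstep.2.2.2 hb
          subst hbf
          rcases List.mem_cons.mp hf with hfp | hfr
          · subst hfp
            exact absurd ((hN c).mpr hbc) hcN
          · exact Or.inr ⟨hv'c, b, List.mem_append_left N hfr,
              Relation.ReflTransGen.single ⟨hbc.1, hbc.2.1, hbc.2.2.1, hv'c⟩⟩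
  · rintro (hcN | ⟨hv', f, hf, hp⟩)
    · have hstep := (hN c).mp hcN
      exact ⟨hstep.2.2.2, p, List.mem_cons_self, Relation.ReflTransGen.single hstep⟩
    · have hvc := (markList_false_iff v N c.1 c.2).mp hv'
      have hpath : Relation.ReflTransGen (StepR land n m v) f c :=
        Relation.ReflTransGen.mono (fun a b h => StepR_of_mark land n m v N a b h) hp
      rcases List.mem_append.mp hf with hfr | hfN
      · exact ⟨hvc.1, f, List.mem_cons_of_mem p hfr, hpath⟩
      · exact ⟨hvc.1, p, List.mem_cons_self,
          Relation.ReflTransGen.head ((hN f).mp hfN) hpath⟩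

theorem NR_step_ncard (land : List (List Int)) (n m : Int) (v : Int → Int → Bool)
    (p : Int × Int) (rest N : List (Int × Int))
    (hq : ∀ c ∈ (p :: rest), v c.1 c.2 = true)
    (hN : ∀ c, c ∈ N ↔ StepR land n m v p c) (hnd : N.Nodup) :
    (NR land n m v (p :: rest)).ncard =
      N.length + (NR land n m (markList v N) (rest ++ N)).ncard := by
  have hq' : ∀ c ∈ rest ++ N, markList v N c.1 c.2 = true := by
    intro c hc
    rcases List.mem_append.mp hc with h | h
    · exact markList_true_of_true v N c.1 c.2 (hq c (List.mem_cons_of_mem p h))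
    · exact markList_true_of_mem v N c h
  rw [NR_step land n m v p rest N hq hN]
  have hdisj : Disjoint {c | c ∈ N} (NR land n m (markList v N) (rest ++ N)) := by
    rw [Set.disjoint_left]
    rintro c hcN ⟨hv', _⟩
    rw [markList_true_of_mem v N c hcN] at hv'
    exact absurd hv' (by simp)
  rw [Set.ncard_union_eq hdisj (List.finite_toSet N)
    (NR_finite land n m _ _ hq')]
  congr 1
  have : {c | c ∈ N} = (↑N.toFinset : Set (Int × Int)) := by
    ext c; simp
  rw [this, Set.ncard_coe_finset, List.toFinset_card_of_nodup hnd]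

theorem unvis_mark (n m : Int) (v : Int → Int → Bool) (a b : Int)
    (h : InG n m (a, b)) (hv : v a b = false) :
    unvis n m v = unvis n m (pvMark v a b) + 1 := by
  obtain ⟨h1, h2, h3, h4⟩ := h
  have hset : ((Finset.range n.toNat ×ˢ Finset.range m.toNat).filter
        (fun c => pvMark v a b (c.1 : Int) (c.2 : Int) = false)) =
      ((Finset.range n.toNat ×ˢ Finset.range m.toNat).filter
        (fun c => v (c.1 : Int) (c.2 : Int) = false)).erase (a.toNat, b.toNat) := by
    ext c
    simp only [Finset.mem_erase, Finset.mem_filter, Finset.mem_product, Finset.mem_range,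
      pvMark]
    constructor
    · rintro ⟨hc, hm⟩
      by_cases hcd : (c.1 : Int) = a ∧ (c.2 : Int) = b
      · rw [if_pos hcd] at hm
        exact absurd hm (by simp)
      · rw [if_neg hcd] at hm
        refine ⟨?_, hc, hm⟩
        rintro ⟨e1, e2⟩
        exact hcd ⟨by omega, by omega⟩
    · rintro ⟨hne, hc, hm⟩
      refine ⟨hc, ?_⟩
      rw [if_neg]
      · exact hm
      · rintro ⟨e1, e2⟩
        exact hne (Prod.ext (by omega) (by omega))
  unfold unvis
  rw [hset]
  rw [Finset.card_erase_add_one]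
  simp only [Finset.mem_filter, Finset.mem_product, Finset.mem_range]
  refine ⟨⟨by omega, by omega⟩, ?_⟩
  rw [Int.toNat_of_nonneg h1, Int.toNat_of_nonneg h3]
  exact hv

theorem unvis_markList (n m : Int) (v : Int → Int → Bool) (N : List (Int × Int))
    (hN : ∀ c ∈ N, InG n m c ∧ v c.1 c.2 = false) (hnd : N.Nodup) :
    unvis n m v = unvis n m (markList v N) + N.length := by
  induction N generalizing v with
  | nil => simp [markList]
  | cons c N ih =>
    have h1 := hN c List.mem_cons_self
    have hstep : unvis n m v = unvis n m (pvMark v c.1 c.2) + 1 :=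
      unvis_mark n m v c.1 c.2 (by simpa using h1.1) h1.2
    have hrec : markList v (c :: N) = markList (pvMark v c.1 c.2) N := rfl
    rw [hrec]
    have hN' : ∀ c' ∈ N, InG n m c' ∧ pvMark v c.1 c.2 c'.1 c'.2 = false := by
      intro c' hc'
      have hne : (c'.1, c'.2) ≠ (c.1, c.2) := by
        intro he
        have : c' = c := by
          obtain ⟨x, y⟩ := c'; obtain ⟨x', y'⟩ := c
          simpa [Prod.ext_iff] using he
        exact (List.nodup_cons.mp hnd).1 (this ▸ hc')
      exact ⟨(hN c' (List.mem_cons_of_mem c hc')).1,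
        (pvMark_ne v c.1 c.2 c'.1 c'.2 hne) ▸ (hN c' (List.mem_cons_of_mem c hc')).2⟩
    rw [hstep, ih (pvMark v c.1 c.2) hN' (List.nodup_cons.mp hnd).2]
    simp only [List.length_cons]
    omega

theorem unvis_le (n m : Int) (v : Int → Int → Bool) (hn : 0 ≤ n) (hm : 0 ≤ m) :
    unvis n m v ≤ (n * m).toNat := by
  obtain ⟨p, rfl⟩ := Int.eq_ofNat_of_zero_le hn
  obtain ⟨q, rfl⟩ := Int.eq_ofNat_of_zero_le hm
  have he : (((p : Int)) * q).toNat = p * q := by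
    rw [← Nat.cast_mul, Int.toNat_natCast]
  rw [he]
  unfold unvis
  have hc := Finset.card_filter_le (Finset.range (p : Int).toNat ×ˢ Finset.range (q : Int).toNat)
    (fun c => v (c.1 : Int) (c.2 : Int) = false)
  simpa [Finset.card_product] using hc

theorem nbrsA_map (x y : Int) :
    ([((0 : Int), (1 : Int)), (1, 0), (0, -1), (-1, 0)].map (fun d => (x + d.1, y + d.2))) =
      [(x, y + 1), (x + 1, y), (x, y - 1), (x - 1, y)] := by
  norm_num
  constructor <;> ring

theorem nbrs_pairwise (cs : List (Int × Int)) (x y : Int)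
    (h : cs = [(x, y + 1), (x + 1, y), (x, y - 1), (x - 1, y)] ∨
         cs = [(x - 1, y), (x + 1, y), (x, y - 1), (x, y + 1)]) :
    cs.Pairwise (· ≠ ·) := by
  rcases h with rfl | rfl <;>
    · simp [List.pairwise_cons, Prod.ext_iff]
      constructor <;> try constructor
      all_goals intros
      all_goals omega

theorem memN_A (land : List (List Int)) (n m x y : Int) (v : Int → Int → Bool) (c : Int × Int) :
    c ∈ ([((x : Int), y + 1), (x + 1, y), (x, y - 1), (x - 1, y)].filter (pvOk land n m v)) ↔
      StepR land n m v (x, y) c := by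
  simp only [List.mem_filter, pvOk, StepR, Nbr, InG, decide_eq_true_eq, List.mem_cons,
    List.not_mem_nil, or_false]
  tauto

theorem memN_B (land : List (List Int)) (n m x y : Int) (v : Int → Int → Bool) (c : Int × Int) :
    c ∈ ([((x : Int) - 1, y), (x + 1, y), (x, y - 1), (x, y + 1)].filter (pvOk land n m v)) ↔
      StepR land n m v (x, y) c := by
  simp only [List.mem_filter, pvOk, StepR, Nbr, InG, decide_eq_true_eq, List.mem_cons,
    List.not_mem_nil, or_false]
  tauto

theorem bfsLoop_spec (land : List (List Int)) (n m : Int) :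
    ∀ (fuel : Nat) (q : List (Int × Int)) (v : Int → Int → Bool) (oil l r : Int),
    (∀ c ∈ q, v c.1 c.2 = true) →
    q.length + unvis n m v ≤ fuel →
    ((∀ i j, (bfsLoop land n m fuel q v oil l r).1 i j = true ↔
        (v i j = true ∨ (i, j) ∈ NR land n m v q)) ∧
     (bfsLoop land n m fuel q v oil l r).2.1 = oil + ((NR land n m v q).ncard : Int) ∧
     MinC (NR land n m v q) l (bfsLoop land n m fuel q v oil l r).2.2.1 ∧
     MaxC (NR land n m v q) r (bfsLoop land n m fuel q v oil l r).2.2.2) := by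
  intro fuel
  induction fuel with
  | zero =>
    intro q v oil l r hq hf
    have hq0 : q = [] := by
      cases q with
      | nil => rfl
      | cons a t => simp at hf
    subst hq0
    rw [NR_nil]
    simp only [bfsLoop]
    exact ⟨by simp, by simp, ⟨le_refl l, by simp, Or.inl rfl⟩, ⟨le_refl r, by simp, Or.inl rfl⟩⟩
  | succ fuel ih =>
    intro q v oil l r hq hf
    cases q with
    | nil =>
      rw [NR_nil]
      simp only [bfsLoop]
      exact ⟨by simp, by simp, ⟨le_refl l, by simp, Or.inl rfl⟩, ⟨le_refl r, by simp, Or.inl rfl⟩⟩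
    | cons p rest =>
      obtain ⟨x, y⟩ := p
      have hpw : (([((0 : Int), (1 : Int)), (1, 0), (0, -1), (-1, 0)]).map
          (fun d => (x + d.1, y + d.2))).Pairwise (· ≠ ·) := by
        rw [nbrsA_map]
        exact nbrs_pairwise _ x y (Or.inl rfl)
      rw [bfsLoop, bfsNbrs_spec land n m x y _ v rest oil l r hpw, nbrsA_map]
      set N := ([(x, y + 1), (x + 1, y), (x, y - 1), (x - 1, y)] : List (Int × Int)).filter
        (pvOk land n m v) with hNdef
      have hmem : ∀ c, c ∈ N ↔ StepR land n m v (x, y) c := fun c => memN_A land n m x y v c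
      have hnd : N.Nodup := (nbrs_pairwise _ x y (Or.inl rfl)).filter _
      have hNg : ∀ c ∈ N, InG n m c ∧ v c.1 c.2 = false := by
        intro c hc
        have := (hmem c).mp hc
        exact ⟨this.2.1, this.2.2.2⟩
      have hq' : ∀ c ∈ rest ++ N, markList v N c.1 c.2 = true := by
        intro c hc
        rcases List.mem_append.mp hc with h | h
        · exact markList_true_of_true v N c.1 c.2 (hq c (List.mem_cons_of_mem _ h))
        · exact markList_true_of_mem v N c h
      have hcnt := unvis_markList n m v N hNg hnd
      have hfuel' : (rest ++ N).length + unvis n m (markList v N) ≤ fuel := by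
        simp only [List.length_cons] at hf
        simp only [List.length_append]
        omega
      have H := ih (rest ++ N) (markList v N) (oil + (N.length : Int))
        ((N.map (·.2)).foldl min l) ((N.map (·.2)).foldl max r) hq' hfuel'
      obtain ⟨Hiff, Hcnt, ⟨Hm1, Hm2, Hm3⟩, ⟨Hx1, Hx2, Hx3⟩⟩ := H
      have hstep := NR_step land n m v (x, y) rest N hq hmem
      have hcard := NR_step_ncard land n m v (x, y) rest N hq hmem hnd
      dsimp only
      refine ⟨?_, ?_, ⟨?_, ?_, ?_⟩, ⟨?_, ?_, ?_⟩⟩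
      · intro i j
        rw [Hiff i j, hstep]
        simp only [Set.mem_union, Set.mem_setOf_eq, markList_spec]
        tauto
      · rw [Hcnt, hcard]
        push_cast
        ring
      · exact le_trans Hm1 (PySem.List.foldl_min_le (N.map (·.2)) l).1
      · rw [hstep]
        rintro c (hcN | hcS)
        · exact le_trans Hm1 ((PySem.List.foldl_min_le (N.map (·.2)) l).2 c.2
            (List.mem_map_of_mem hcN))
        · exact Hm2 c hcS
      · rw [hstep]
        rcases Hm3 with he | ⟨c, hc, he⟩
        · rcases PySem.List.foldl_min_mem (N.map (·.2)) l with h | h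
          · exact Or.inl (he.trans h)
          · obtain ⟨c, hcN, hce⟩ := List.mem_map.mp h
            exact Or.inr ⟨c, Or.inl hcN, he.trans hce.symm⟩
        · exact Or.inr ⟨c, Or.inr hc, he⟩
      · exact le_trans (PySem.List.le_foldl_max (N.map (·.2)) r).1 Hx1
      · rw [hstep]
        rintro c (hcN | hcS)
        · exact le_trans ((PySem.List.le_foldl_max (N.map (·.2)) r).2 c.2
            (List.mem_map_of_mem hcN)) Hx1
        · exact Hx2 c hcS
      · rw [hstep]
        rcases Hx3 with he | ⟨c, hc, he⟩
        · rcases PySem.List.foldl_max_mem (N.map (·.2)) r with h | h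
          · exact Or.inl (he.trans h)
          · obtain ⟨c, hcN, hce⟩ := List.mem_map.mp h
            exact Or.inr ⟨c, Or.inl hcN, he.trans hce.symm⟩
        · exact Or.inr ⟨c, Or.inr hc, he⟩

theorem getD_set_int (xs : List Int) (i k : Nat) (v : Int) :
    (xs.set i v).getD k 0 = if k = i ∧ i < xs.length then v else xs.getD k 0 := by
  simp only [List.getD_eq_getElem?_getD, List.getElem?_set]
  split_ifs with h1 h2 <;> simp_all

-- A's 'for i in range(left, right+1): oils[i] += w' as a pointwise description
theorem addRange_spec (w : Int) : ∀ (t : Nat) (a b : Int) (os : List Int),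
    (b - a).toNat = t → 0 ≤ a →
    (((PySem.List.pyRange a b 1).foldl
        (fun os i => PySem.List.pySetD os i (PySem.List.pyGetD os i 0 + w)) os).length =
      os.length ∧
     ∀ k : Nat, k < os.length →
       ((PySem.List.pyRange a b 1).foldl
         (fun os i => PySem.List.pySetD os i (PySem.List.pyGetD os i 0 + w)) os).getD k 0 =
         os.getD k 0 + if a ≤ (k : Int) ∧ (k : Int) < b then w else 0) := by
  intro t
  induction t with
  | zero =>
    intro a b os ht ha
    rw [PySem.List.pyRange_one_eq_nil (by omega)]
    refine ⟨rfl, fun k hk => ?_⟩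
    rw [if_neg (by omega)]
    simp
  | succ t ih =>
    intro a b os ht ha
    rw [PySem.List.pyRange_one_cons (by omega)]
    simp only [List.foldl_cons]
    set os1 := PySem.List.pySetD os a (PySem.List.pyGetD os a 0 + w) with hos1
    have hlen1 : os1.length = os.length := by
      rw [hos1, PySem.List.length_pySetD]
    have hos1k : ∀ k : Nat, k < os.length →
        os1.getD k 0 = os.getD k 0 + if (k : Int) = a then w else 0 := by
      intro k hk
      rw [hos1, PySem.List.pySetD_of_nonneg os (PySem.List.pyGetD os a 0 + w) ha,
        getD_set_int]
      by_cases hka : (k : Int) = a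
      · rw [if_pos ⟨by omega, by omega⟩, if_pos hka]
        rw [PySem.List.pyGetD_eq_getElem os 0 ha (by omega)]
        rw [List.getD_eq_getElem os 0 hk]
        congr 2
        omega
      · rw [if_neg ?_, if_neg hka, add_zero]
        rintro ⟨h1, h2⟩
        apply hka
        omega
    obtain ⟨ihlen, ihk⟩ := ih (a + 1) b os1 (by omega) (by omega)
    refine ⟨by rw [ihlen, hlen1], fun k hk => ?_⟩
    rw [ihk k (by omega), hos1k k hk]
    by_cases hka : (k : Int) = a
    · rw [if_pos hka, if_neg (by omega), if_pos (by constructor <;> omega)]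
      ring
    · rw [if_neg hka]
      by_cases hcond : a + 1 ≤ (k : Int) ∧ (k : Int) < b
      · rw [if_pos hcond, if_pos (by constructor <;> omega)]
        ring
      · rw [if_neg hcond, if_neg (by omega)]
        ring


-- ===== component theory: oil cells, oil adjacency, components, column spans =====
def OilC (land : List (List Int)) (n m : Int) (c : Int × Int) : Prop :=
  InG n m c ∧ pvGet land c.1 c.2 = 1

def EdgeO (land : List (List Int)) (n m : Int) (a b : Int × Int) : Prop :=
  Nbr a b ∧ OilC land n m a ∧ OilC land n m b

def Reach0 (land : List (List Int)) (n m : Int) (a b : Int × Int) : Prop :=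
  Relation.ReflTransGen (EdgeO land n m) a b

def compO (land : List (List Int)) (n m : Int) (c : Int × Int) : Set (Int × Int) :=
  {d | Reach0 land n m c d}

def SpanC (S : Set (Int × Int)) (k : Int) : Prop :=
  (∃ a ∈ S, a.2 ≤ k) ∧ (∃ a ∈ S, k ≤ a.2)

def ClosedV (land : List (List Int)) (n m : Int) (v : Int → Int → Bool) : Prop :=
  ∀ a b, v a.1 a.2 = true → EdgeO land n m a b → v b.1 b.2 = true

theorem Nbr_symm (a b : Int × Int) (h : Nbr a b) : Nbr b a := by
  obtain ⟨a1, a2⟩ := a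
  obtain ⟨b1, b2⟩ := b
  simp only [Nbr, Prod.ext_iff] at h ⊢
  omega

theorem EdgeO_symm (land : List (List Int)) (n m : Int) :
    Symmetric (EdgeO land n m) := by
  rintro a b ⟨h1, h2, h3⟩
  exact ⟨Nbr_symm a b h1, h3, h2⟩

theorem Reach0_symm (land : List (List Int)) (n m : Int) (a b : Int × Int)
    (h : Reach0 land n m a b) : Reach0 land n m b a :=
  Relation.ReflTransGen.symmetric (EdgeO_symm land n m) h

theorem oil_of_reach (land : List (List Int)) (n m : Int) (a b : Int × Int)
    (ha : OilC land n m a) (h : Reach0 land n m a b) : OilC land n m b := by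
  rcases Relation.ReflTransGen.cases_tail h with heq | ⟨c, _, hstep⟩
  · exact heq ▸ ha
  · exact hstep.2.2

theorem compO_eq_of_mem (land : List (List Int)) (n m : Int) (c d : Int × Int)
    (h : Reach0 land n m c d) : compO land n m d = compO land n m c := by
  ext e
  constructor
  · intro he
    exact h.trans he
  · intro he
    exact (Reach0_symm land n m c d h).trans he

theorem compO_finite (land : List (List Int)) (n m : Int) (c : Int × Int) :
    (compO land n m c).Finite := by
  apply ((grid_finite n m).union (Set.finite_singleton c)).subset
  intro d hd
  rcases Relation.ReflTransGen.cases_tail hd with heq | ⟨e, _, hstep⟩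
  · exact Or.inr (by simp [heq])
  · exact Or.inl hstep.2.2.1

theorem closed_reach (land : List (List Int)) (n m : Int) (v : Int → Int → Bool)
    (hcl : ClosedV land n m v) (a b : Int × Int) (ha : v a.1 a.2 = true)
    (h : Reach0 land n m a b) : v b.1 b.2 = true := by
  induction h with
  | refl => exact ha
  | tail _ hstep ih => exact hcl _ _ ih hstep

theorem comp_disjoint (land : List (List Int)) (n m : Int) (v : Int → Int → Bool)
    (hcl : ClosedV land n m v) (c : Int × Int) (hc : v c.1 c.2 = false) :
    ∀ d ∈ compO land n m c, v d.1 d.2 = false := by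
  intro d hd
  by_contra hne
  have hd' : v d.1 d.2 = true := by
    cases hvd : v d.1 d.2
    · exact absurd hvd hne
    · rfl
  have := closed_reach land n m v hcl d c hd' (Reach0_symm land n m c d hd)
  rw [this] at hc
  exact absurd hc (by simp)

theorem StepR_reach (land : List (List Int)) (n m : Int) (v : Int → Int → Bool)
    (f d : Int × Int) (hf : OilC land n m f)
    (h : Relation.ReflTransGen (StepR land n m v) f d) : Reach0 land n m f d := by
  induction h with
  | refl => exact Relation.ReflTransGen.refl
  | tail _ hstep ih =>
    exact ih.tail ⟨hstep.1, oil_of_reach land n m f _ hf ih, hstep.2.1, hstep.2.2.1⟩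

-- every still-unvisited cell of the component is found by the search started at c
theorem reach_in_NR (land : List (List Int)) (n m : Int) (v : Int → Int → Bool)
    (c : Int × Int) (hdisj : ∀ d ∈ compO land n m c, v d.1 d.2 = false)
    (d : Int × Int) (h : Reach0 land n m c d) :
    d = c ∨ d ∈ NR land n m (pvMark v c.1 c.2) [c] := by
  induction h with
  | refl => exact Or.inl rfl
  | @tail b d hcb hstep ih =>
    by_cases hdc : d = c
    · exact Or.inl hdc
    · have hdcomp : d ∈ compO land n m c := hcb.tail hstep
      have hd' : pvMark v c.1 c.2 d.1 d.2 = false := by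
        rw [pvMark_ne v c.1 c.2 d.1 d.2 (by
          intro he
          exact hdc (Prod.ext (congrArg Prod.fst he) (congrArg Prod.snd he)))]
        exact hdisj d hdcomp
      have hstepR : StepR land n m (pvMark v c.1 c.2) b d :=
        ⟨hstep.1, hstep.2.2.1, hstep.2.2.2, hd'⟩
      rcases ih with rfl | ⟨_, f, hfm, hp⟩
      · exact Or.inr ⟨hd', b, List.mem_singleton.mpr rfl,
          Relation.ReflTransGen.single hstepR⟩
      · exact Or.inr ⟨hd', f, hfm, hp.tail hstepR⟩

theorem NR_eq_comp (land : List (List Int)) (n m : Int) (v : Int → Int → Bool)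
    (c : Int × Int) (hoil : OilC land n m c) (hcl : ClosedV land n m v)
    (hc : v c.1 c.2 = false) :
    NR land n m (pvMark v c.1 c.2) [c] = compO land n m c \ {c} := by
  have hdisj := comp_disjoint land n m v hcl c hc
  ext d
  constructor
  · rintro ⟨hvd, f, hfm, hp⟩
    rw [List.mem_singleton] at hfm
    rw [hfm] at hp
    refine ⟨StepR_reach land n m _ c d hoil hp, ?_⟩
    intro hdc
    rw [Set.mem_singleton_iff] at hdc
    subst hdc
    rw [pvMark] at hvd
    simp at hvd
  · rintro ⟨hreach, hne⟩
    rcases reach_in_NR land n m v c hdisj d hreach with rfl | h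
    · simp at hne
    · exact h

-- discrete intermediate-value property: along an oil path the column sweeps its range
theorem path_ivt (land : List (List Int)) (n m : Int) (b b' : Int × Int)
    (h : Reach0 land n m b b') : ∀ k : Int, b.2 ≤ k → k ≤ b'.2 →
    ∃ d, Reach0 land n m b d ∧ d.2 = k := by
  induction h with
  | refl =>
    intro k h1 h2
    exact ⟨b, Relation.ReflTransGen.refl, by omega⟩
  | @tail x d hbx hstep ih =>
    intro k h1 h2
    by_cases hkx : k ≤ x.2
    · obtain ⟨e, he1, he2⟩ := ih k h1 hkx
      exact ⟨e, he1, he2⟩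
    · have hnbr := hstep.1
      have : d.2 = x.2 ∨ d.2 = x.2 + 1 ∨ d.2 = x.2 - 1 := by
        obtain ⟨x1, x2⟩ := x
        rcases hnbr with rfl | rfl | rfl | rfl <;> simp
      have hk : k = d.2 := by omega
      exact ⟨d, hbx.tail hstep, hk.symm⟩

-- a component touches column k iff k lies in the component's column span
theorem touches_iff_span (land : List (List Int)) (n m : Int) (a : Int × Int) (k : Int) :
    (∃ b ∈ compO land n m a, b.2 = k) ↔ SpanC (compO land n m a) k := by
  constructor
  · rintro ⟨b, hb, rfl⟩
    exact ⟨⟨b, hb, le_refl _⟩, ⟨b, hb, le_refl _⟩⟩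
  · rintro ⟨⟨b1, hb1, h1⟩, ⟨b2, hb2, h2⟩⟩
    have hpath : Reach0 land n m b1 b2 :=
      (Reach0_symm land n m a b1 hb1).trans hb2
    obtain ⟨d, hd1, hd2⟩ := path_ivt land n m b1 b2 hpath k h1 h2
    exact ⟨d, hb1.trans hd1, hd2⟩


-- ===== A side: the outer fold maintains "oils[k] = # oil cells whose component spans k" =====
def CntSet (land : List (List Int)) (n m : Int) (v : Int → Int → Bool) (k : Int) :
    Set (Int × Int) :=
  {a | v a.1 a.2 = true ∧ SpanC (compO land n m a) k}

-- the quantity both programs compute per column: oil cells whose component spans it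
def TSet (land : List (List Int)) (n m : Int) (k : Int) : Set (Int × Int) :=
  {a | OilC land n m a ∧ SpanC (compO land n m a) k}

def InvA (land : List (List Int)) (n m : Int) (st : (Int → Int → Bool) × List Int) : Prop :=
  (∀ c : Int × Int, st.1 c.1 c.2 = true → OilC land n m c) ∧
  ClosedV land n m st.1 ∧
  st.2.length = m.toNat ∧
  (∀ k : Nat, k < m.toNat → st.2.getD k 0 = ((CntSet land n m st.1 (k : Int)).ncard : Int))

theorem CntSet_finite (land : List (List Int)) (n m : Int) (v : Int → Int → Bool) (k : Int)
    (hsub : ∀ c : Int × Int, v c.1 c.2 = true → OilC land n m c) :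
    (CntSet land n m v k).Finite :=
  (grid_finite n m).subset (fun c hc => (hsub c hc.1).1)

theorem cell_ready (n m x y : Int) (v : Int → Int → Bool) (hn : 0 ≤ n) (hm : 0 ≤ m) :
    (∀ c ∈ [((x : Int), y)], pvMark v x y c.1 c.2 = true) ∧
    ([((x : Int), y)].length + unvis n m (pvMark v x y) ≤ (n * m).toNat + 1) := by
  constructor
  · rintro c hc
    rw [List.mem_singleton] at hc
    subst hc
    simp [pvMark]
  · have := unvis_le n m (pvMark v x y) hn hm
    simp only [List.length_singleton]
    omega

theorem bfsCellA_inv (land : List (List Int)) (n m x y : Int) (hn : 0 ≤ n) (hm : 0 ≤ m)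
    (hin : InG n m (x, y)) (st : (Int → Int → Bool) × List Int) (h : InvA land n m st) :
    InvA land n m (bfsCellA land n m st x y) := by
  obtain ⟨hsub, hcl, hlen, hoils⟩ := h
  simp only [bfsCellA]
  by_cases hg : st.1 x y = false ∧ pvGet land x y = 1
  · rw [if_pos hg]
    set v := st.1 with hv
    have hoil : OilC land n m (x, y) := ⟨hin, hg.2⟩
    obtain ⟨hq, hf⟩ := cell_ready n m x y v hn hm
    obtain ⟨Aiff, Acnt, Amin, Amax⟩ :=
      bfsLoop_spec land n m ((n * m).toNat + 1) [(x, y)] (pvMark v x y) 1 y y hq hf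
    set out := bfsLoop land n m ((n * m).toNat + 1) [(x, y)] (pvMark v x y) 1 y y with hout
    have hNR : NR land n m (pvMark v x y) [(x, y)] = compO land n m (x, y) \ {(x, y)} :=
      NR_eq_comp land n m v (x, y) hoil hcl hg.1
    rw [hNR] at Aiff Acnt Amin Amax
    have hcmem : (x, y) ∈ compO land n m (x, y) := Relation.ReflTransGen.refl
    have hcfin := compO_finite land n m (x, y)
    have hcomp_card := Set.ncard_diff_singleton_add_one hcmem hcfin
    -- the flood's count is the component's size
    have hw : out.2.1 = ((compO land n m (x, y)).ncard : Int) := by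
      rw [Acnt]
      omega
    -- every component cell is a (nonneg) column
    have hcols : ∀ a ∈ compO land n m (x, y), 0 ≤ a.2 ∧ a.2 < m := by
      intro a ha
      have := (oil_of_reach land n m (x, y) a hoil ha).1
      exact ⟨this.2.2.1, this.2.2.2⟩
    obtain ⟨m1, m2, m3⟩ := Amin
    obtain ⟨x1, x2, x3⟩ := Amax
    -- l ≤ k < r + 1 is exactly "the component's span contains k"
    have hbridge : ∀ k : Int, (out.2.2.1 ≤ k ∧ k < out.2.2.2 + 1) ↔
        SpanC (compO land n m (x, y)) k := by
      intro k
      constructor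
      · rintro ⟨hlk, hkr⟩
        constructor
        · rcases m3 with he | ⟨c', hc', he⟩
          · exact ⟨(x, y), hcmem, by omega⟩
          · exact ⟨c', hc'.1, by omega⟩
        · rcases x3 with he | ⟨c', hc', he⟩
          · exact ⟨(x, y), hcmem, by omega⟩
          · exact ⟨c', hc'.1, by omega⟩
      · rintro ⟨⟨a, ha, hak⟩, ⟨b, hb, hkb⟩⟩
        constructor
        · by_cases hax : a = (x, y)
          · subst hax
            omega
          · have := m2 a ⟨ha, by simp [hax]⟩
            omega
        · by_cases hbx : b = (x, y)
          · subst hbx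
            omega
          · have := x2 b ⟨hb, by simp [hbx]⟩
            omega
    have hl0 : 0 ≤ out.2.2.1 := by
      rcases m3 with he | ⟨c', hc', he⟩
      · have := hin.2.2.1
        omega
      · have := (hcols c' hc'.1).1
        omega
    -- the flood's visited set is the old one plus the whole component
    have hchar : ∀ i j, out.1 i j = true ↔
        (v i j = true ∨ (i, j) ∈ compO land n m (x, y)) := by
      intro i j
      rw [Aiff i j]
      constructor
      · rintro (hm' | hm')
        · by_cases hij : (i, j) = (x, y)
          · exact Or.inr (hij ▸ hcmem)
          · rw [pvMark_ne v x y i j hij] at hm'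
            exact Or.inl hm'
        · exact Or.inr hm'.1
      · rintro (hm' | hm')
        · left
          by_cases hij : (i, j) = (x, y)
          · have hi : i = x := congrArg Prod.fst hij
            have hj : j = y := congrArg Prod.snd hij
            subst hi; subst hj
            simp [pvMark]
          · rw [pvMark_ne v x y i j hij]
            exact hm'
        · by_cases hij : (i, j) = (x, y)
          · left
            have hi : i = x := congrArg Prod.fst hij
            have hj : j = y := congrArg Prod.snd hij
            subst hi; subst hj
            simp [pvMark]
          · exact Or.inr ⟨hm', by simp [hij]⟩
    obtain ⟨hlen', hupd⟩ := addRange_spec out.2.1 ((out.2.2.2 + 1 - out.2.2.1)).toNat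
      out.2.2.1 (out.2.2.2 + 1) st.2 rfl hl0
    have hdis : ∀ a ∈ compO land n m (x, y), v a.1 a.2 = false :=
      comp_disjoint land n m v hcl (x, y) hg.1
    refine ⟨?_, ?_, ?_, ?_⟩
    · intro c hc
      rcases (hchar c.1 c.2).mp hc with h' | h'
      · exact hsub c h'
      · exact oil_of_reach land n m (x, y) c hoil h'
    · intro a b ha he
      rcases (hchar a.1 a.2).mp ha with h' | h'
      · exact (hchar b.1 b.2).mpr (Or.inl (hcl a b h' he))
      · exact (hchar b.1 b.2).mpr (Or.inr (h'.tail he))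
    · rw [hlen', hlen]
    · intro k hk
      have hksplit := hupd k (by omega)
      rw [hksplit, hoils k hk]
      have hset : CntSet land n m out.1 (k : Int) =
          CntSet land n m v (k : Int) ∪
            {a ∈ compO land n m (x, y) | SpanC (compO land n m (x, y)) (k : Int)} := by
        ext a
        simp only [CntSet, Set.mem_setOf_eq, Set.mem_union]
        constructor
        · rintro ⟨hva, hsp⟩
          rcases (hchar a.1 a.2).mp hva with h' | h'
          · exact Or.inl ⟨h', hsp⟩
          · rw [compO_eq_of_mem land n m (x, y) a h'] at hsp
            exact Or.inr ⟨h', hsp⟩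
        · rintro (⟨hva, hsp⟩ | ⟨hac, hsp⟩)
          · exact ⟨(hchar a.1 a.2).mpr (Or.inl hva), hsp⟩
          · exact ⟨(hchar a.1 a.2).mpr (Or.inr hac),
              by rw [compO_eq_of_mem land n m (x, y) a hac]; exact hsp⟩
      by_cases hsp : SpanC (compO land n m (x, y)) (k : Int)
      · have hset2 : {a ∈ compO land n m (x, y) |
            SpanC (compO land n m (x, y)) (k : Int)} = compO land n m (x, y) := by
          ext a
          simp [hsp]
        rw [hset2] at hset
        have hdisj : Disjoint (CntSet land n m v (k : Int)) (compO land n m (x, y)) := by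
          rw [Set.disjoint_left]
          rintro a ⟨hva, _⟩ hac
          rw [hdis a hac] at hva
          exact absurd hva (by simp)
        have hcard : (CntSet land n m out.1 (k : Int)).ncard =
            (CntSet land n m v (k : Int)).ncard + (compO land n m (x, y)).ncard := by
          rw [hset]
          exact Set.ncard_union_eq hdisj (CntSet_finite land n m v _ hsub) hcfin
        rw [if_pos ((hbridge (k : Int)).mpr hsp), hcard, hw]
        push_cast
        ring
      · have hset2 : {a ∈ compO land n m (x, y) |
            SpanC (compO land n m (x, y)) (k : Int)} = ∅ := by
          ext a
          simp [hsp]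
        rw [hset2, Set.union_empty] at hset
        rw [if_neg (fun hc => hsp ((hbridge (k : Int)).mp hc)), hset]
        ring
  · rw [if_neg hg]
    exact ⟨hsub, hcl, hlen, hoils⟩


theorem bfsCellA_mono (land : List (List Int)) (n m : Int) (hn : 0 ≤ n) (hm : 0 ≤ m)
    (st : (Int → Int → Bool) × List Int) (x y i j : Int) (h : st.1 i j = true) :
    (bfsCellA land n m st x y).1 i j = true := by
  simp only [bfsCellA]
  by_cases hg : st.1 x y = false ∧ pvGet land x y = 1
  · rw [if_pos hg]
    obtain ⟨hq, hf⟩ := cell_ready n m x y st.1 hn hm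
    obtain ⟨Aiff, _, _, _⟩ :=
      bfsLoop_spec land n m ((n * m).toNat + 1) [(x, y)] (pvMark st.1 x y) 1 y y hq hf
    refine (Aiff i j).mpr (Or.inl ?_)
    by_cases hij : (i, j) = (x, y)
    · have hi : i = x := congrArg Prod.fst hij
      have hj : j = y := congrArg Prod.snd hij
      subst hi; subst hj
      simp [pvMark]
    · rw [pvMark_ne st.1 x y i j hij]
      exact h
  · rw [if_neg hg]
    exact h

theorem bfsCellA_visits (land : List (List Int)) (n m : Int) (hn : 0 ≤ n) (hm : 0 ≤ m)
    (st : (Int → Int → Bool) × List Int) (x y : Int) (hoil : pvGet land x y = 1) :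
    (bfsCellA land n m st x y).1 x y = true := by
  simp only [bfsCellA]
  by_cases hg : st.1 x y = false ∧ pvGet land x y = 1
  · rw [if_pos hg]
    obtain ⟨hq, hf⟩ := cell_ready n m x y st.1 hn hm
    obtain ⟨Aiff, _, _, _⟩ :=
      bfsLoop_spec land n m ((n * m).toNat + 1) [(x, y)] (pvMark st.1 x y) 1 y y hq hf
    exact (Aiff x y).mpr (Or.inl (by simp [pvMark]))
  · rw [if_neg hg]
    cases hv : st.1 x y
    · exact absurd ⟨hv, hoil⟩ hg
    · rfl

theorem row_mono (land : List (List Int)) (n m : Int) (hn : 0 ≤ n) (hm : 0 ≤ m) (x : Int) :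
    ∀ (ys : List Int) (st : (Int → Int → Bool) × List Int) (i j : Int),
    st.1 i j = true → (ys.foldl (fun st y => bfsCellA land n m st x y) st).1 i j = true := by
  intro ys
  induction ys with
  | nil => intro st i j h; exact h
  | cons y ys ih =>
    intro st i j h
    exact ih _ i j (bfsCellA_mono land n m hn hm st x y i j h)

theorem row_visits (land : List (List Int)) (n m : Int) (hn : 0 ≤ n) (hm : 0 ≤ m) (x : Int) :
    ∀ (ys : List Int) (st : (Int → Int → Bool) × List Int) (y0 : Int), y0 ∈ ys →
    pvGet land x y0 = 1 →
    (ys.foldl (fun st y => bfsCellA land n m st x y) st).1 x y0 = true := by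
  intro ys
  induction ys with
  | nil => intro st y0 h; simp at h
  | cons y ys ih =>
    intro st y0 hy0 hoil
    simp only [List.foldl_cons]
    rcases List.mem_cons.mp hy0 with rfl | hy0'
    · exact row_mono land n m hn hm x ys _ x y0
        (bfsCellA_visits land n m hn hm st x y0 hoil)
    · exact ih _ y0 hy0' hoil

theorem rows_mono (land : List (List Int)) (n m : Int) (hn : 0 ≤ n) (hm : 0 ≤ m) :
    ∀ (xs : List Int) (st : (Int → Int → Bool) × List Int) (i j : Int),
    st.1 i j = true →
    (xs.foldl (fun st x => (PySem.List.pyRange 0 m 1).foldl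
      (fun st y => bfsCellA land n m st x y) st) st).1 i j = true := by
  intro xs
  induction xs with
  | nil => intro st i j h; exact h
  | cons x xs ih =>
    intro st i j h
    exact ih _ i j (row_mono land n m hn hm x _ st i j h)

theorem rows_visits (land : List (List Int)) (n m : Int) (hn : 0 ≤ n) (hm : 0 ≤ m) :
    ∀ (xs : List Int) (st : (Int → Int → Bool) × List Int) (a : Int × Int), a.1 ∈ xs →
    a.2 ∈ PySem.List.pyRange 0 m 1 → pvGet land a.1 a.2 = 1 →
    (xs.foldl (fun st x => (PySem.List.pyRange 0 m 1).foldl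
      (fun st y => bfsCellA land n m st x y) st) st).1 a.1 a.2 = true := by
  intro xs
  induction xs with
  | nil => intro st a h; simp at h
  | cons x xs ih =>
    intro st a ha hy hoil
    obtain ⟨a1, a2⟩ := a
    simp only [List.foldl_cons]
    rcases List.mem_cons.mp ha with he | ha'
    · dsimp only at he hy hoil ⊢
      subst he
      exact rows_mono land n m hn hm xs _ a1 a2
        (row_visits land n m hn hm a1 _ st a2 hy hoil)
    · exact ih _ (a1, a2) ha' hy hoil

theorem rows_inv (land : List (List Int)) (n m : Int) (hn : 0 ≤ n) (hm : 0 ≤ m) :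
    ∀ (xs : List Int) (st : (Int → Int → Bool) × List Int),
    (∀ x ∈ xs, 0 ≤ x ∧ x < n) → InvA land n m st →
    InvA land n m (xs.foldl (fun st x => (PySem.List.pyRange 0 m 1).foldl
      (fun st y => bfsCellA land n m st x y) st) st) := by
  intro xs
  induction xs with
  | nil => intro st _ h; exact h
  | cons x xs ih =>
    intro st hxs h
    simp only [List.foldl_cons]
    refine ih _ (fun x' hx' => hxs x' (List.mem_cons_of_mem x hx')) ?_
    have hx := hxs x List.mem_cons_self
    -- inner row fold preserves the invariant
    have : ∀ (ys : List Int) (st : (Int → Int → Bool) × List Int),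
        (∀ y ∈ ys, 0 ≤ y ∧ y < m) → InvA land n m st →
        InvA land n m (ys.foldl (fun st y => bfsCellA land n m st x y) st) := by
      intro ys
      induction ys with
      | nil => intro st _ h; exact h
      | cons y ys ihy =>
        intro st hys h
        have hy := hys y List.mem_cons_self
        exact ihy _ (fun y' hy' => hys y' (List.mem_cons_of_mem y hy'))
          (bfsCellA_inv land n m x y hn hm ⟨hx.1, hx.2, hy.1, hy.2⟩ st h)
    exact this _ st (fun y hy => (PySem.List.mem_pyRange_one.mp hy).imp id id) h

-- final characterisation of A's oils array: oils[k] = |TSet k|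
theorem A_fold_spec (land : List (List Int)) (n m : Int) (hn : 0 ≤ n) (hm : 0 ≤ m) :
    ((PySem.List.pyRange 0 n 1).foldl
      (fun st x => (PySem.List.pyRange 0 m 1).foldl (fun st y => bfsCellA land n m st x y) st)
      (fun _ _ => false, List.replicate m.toNat 0)).2.length = m.toNat ∧
    (∀ k : Nat, k < m.toNat →
      ((PySem.List.pyRange 0 n 1).foldl
        (fun st x => (PySem.List.pyRange 0 m 1).foldl (fun st y => bfsCellA land n m st x y) st)
        (fun _ _ => false, List.replicate m.toNat 0)).2.getD k 0 =
        ((TSet land n m (k : Int)).ncard : Int)) := by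
  have hinv0 : InvA land n m ((fun _ _ => false), List.replicate m.toNat 0) := by
    refine ⟨by simp, by intro a b h; simp at h, by simp, ?_⟩
    intro k hk
    have : CntSet land n m (fun _ _ => false) (k : Int) = ∅ := by
      ext a
      simp [CntSet]
    rw [List.getD_replicate 0 hk, this]
    simp
  have hinv := rows_inv land n m hn hm (PySem.List.pyRange 0 n 1) _
    (fun x hx => (PySem.List.mem_pyRange_one.mp hx).imp id id) hinv0
  set fin := (PySem.List.pyRange 0 n 1).foldl
    (fun st x => (PySem.List.pyRange 0 m 1).foldl (fun st y => bfsCellA land n m st x y) st)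
    (fun _ _ => false, List.replicate m.toNat 0) with hfin
  obtain ⟨hsub, _, hlen, hoils⟩ := hinv
  refine ⟨hlen, ?_⟩
  intro k hk
  rw [hoils k hk]
  congr 2
  ext a
  simp only [CntSet, TSet, Set.mem_setOf_eq]
  constructor
  · rintro ⟨hva, hsp⟩
    exact ⟨hsub a hva, hsp⟩
  · rintro ⟨hoa, hsp⟩
    refine ⟨?_, hsp⟩
    have h1 : a.1 ∈ PySem.List.pyRange 0 n 1 :=
      PySem.List.mem_pyRange_one.mpr ⟨hoa.1.1, hoa.1.2.1⟩
    have h2 : a.2 ∈ PySem.List.pyRange 0 m 1 :=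
      PySem.List.mem_pyRange_one.mpr ⟨hoa.1.2.2.1, hoa.1.2.2.2⟩
    exact rows_visits land n m hn hm _ _ a h1 h2 hoa.2


-- ===== B side: each column's multi-source flood fill counts |TSet col| =====
-- the seen set, viewed as a visited predicate
def vOf (s : List (Int × Int)) : Int → Int → Bool := fun i j => decide ((i, j) ∈ s)

theorem bool_eq_of_iff {a b : Bool} (h : a = true ↔ b = true) : a = b := by
  cases a <;> cases b <;> simp_all

theorem mem_addList (s : PySem.Set (Int × Int)) (N : List (Int × Int)) (y : Int × Int) :
    y ∈ N.foldl PySem.Set.add s ↔ y ∈ s ∨ y ∈ N := by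
  have h := PySem.Set.mem_foldl_add N (fun b => b) s y
  simpa using h

theorem vOf_addList (s : PySem.Set (Int × Int)) (N : List (Int × Int)) :
    vOf (N.foldl PySem.Set.add s) = markList (vOf s) N := by
  funext i j
  apply bool_eq_of_iff
  rw [markList_spec]
  simp only [vOf, decide_eq_true_eq]
  exact mem_addList s N (i, j)

theorem vOf_false_iff (s : List (Int × Int)) (i j : Int) :
    vOf s i j = false ↔ (i, j) ∉ s := by
  simp [vOf]

theorem floodPush_spec (land : List (List Int)) (n m : Int) :
    ∀ (cs : List (Int × Int)) (s : PySem.Set (Int × Int)) (stk : List (Int × Int)) (cnt : Int),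
    cs.Pairwise (· ≠ ·) →
    floodPush land n m cs (s, stk, cnt) =
      ((cs.filter (pvOk land n m (vOf s))).foldl PySem.Set.add s,
       (cs.filter (pvOk land n m (vOf s))).reverse ++ stk,
       cnt + ((cs.filter (pvOk land n m (vOf s))).length : Int)) := by
  intro cs
  induction cs with
  | nil =>
    intro s stk cnt _
    simp [floodPush]
  | cons c cs ih =>
    intro s stk cnt hd
    obtain ⟨nx, ny⟩ := c
    obtain ⟨hne, hd'⟩ := List.pairwise_cons.mp hd
    rw [floodPush]
    by_cases hok : pvOk land n m (vOf s) (nx, ny) = true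
    · have hcond : (0 ≤ nx ∧ nx < n ∧ 0 ≤ ny ∧ ny < m) ∧
          PySem.Set.contains s (nx, ny) = false ∧
          PySem.List.pyGetD (PySem.List.pyGetD land nx []) ny 0 = 1 := by
        simp only [pvOk, decide_eq_true_eq] at hok
        refine ⟨hok.1, ?_, hok.2.2⟩
        apply bool_eq_of_iff
        simp only [PySem.Set.contains_iff]
        have := (vOf_false_iff s nx ny).mp hok.2.1
        simp [this]
      rw [if_pos hcond, ih _ _ _ hd']
      have hm1 : (nx, ny) ∉ s := (vOf_false_iff s nx ny).mp (by
        simp only [pvOk, decide_eq_true_eq] at hok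
        exact hok.2.1)
      have hvadd : vOf (PySem.Set.add s (nx, ny)) = pvMark (vOf s) nx ny := by
        have h1 : PySem.Set.add s (nx, ny) = [((nx : Int), ny)].foldl PySem.Set.add s := rfl
        rw [h1, vOf_addList]
        rfl
      have hfe : cs.filter (pvOk land n m (vOf (PySem.Set.add s (nx, ny)))) =
          cs.filter (pvOk land n m (vOf s)) := by
        rw [hvadd]
        exact filter_pvOk_mark land n m (vOf s) (nx, ny) cs (fun c' hc' => (hne c' hc').symm)
      rw [hfe, List.filter_cons_of_pos hok]
      refine congrArg₂ _ ?_ (congrArg₂ _ ?_ ?_)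
      · rw [List.foldl_cons]
      · simp
      · simp only [List.length_cons]
        push_cast
        ring
    · have hcond : ¬ ((0 ≤ nx ∧ nx < n ∧ 0 ≤ ny ∧ ny < m) ∧
          PySem.Set.contains s (nx, ny) = false ∧
          PySem.List.pyGetD (PySem.List.pyGetD land nx []) ny 0 = 1) := by
        intro hc
        apply hok
        simp only [pvOk, decide_eq_true_eq]
        refine ⟨hc.1, ?_, hc.2.2⟩
        rw [vOf_false_iff]
        intro hmem
        have := (PySem.Set.contains_iff s (nx, ny)).mpr hmem
        rw [this] at hc
        exact absurd hc.2.1 (by simp)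
      rw [if_neg hcond, ih _ _ _ hd']
      have hokf : pvOk land n m (vOf s) (nx, ny) = false := by
        cases h : pvOk land n m (vOf s) (nx, ny)
        · rfl
        · exact absurd h hok
      rw [List.filter_cons_of_neg (by simp [hokf])]

theorem floodLoop_spec (land : List (List Int)) (n m : Int) :
    ∀ (fuel : Nat) (q : List (Int × Int)) (s : PySem.Set (Int × Int)) (cnt : Int),
    (∀ c ∈ q, vOf s c.1 c.2 = true) →
    q.length + unvis n m (vOf s) ≤ fuel →
    floodLoop land n m fuel s q cnt = cnt + ((NR land n m (vOf s) q).ncard : Int) := by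
  intro fuel
  induction fuel with
  | zero =>
    intro q s cnt hq hf
    have hq0 : q = [] := by
      cases q with
      | nil => rfl
      | cons a t => simp at hf
    subst hq0
    rw [NR_nil]
    simp [floodLoop]
  | succ fuel ih =>
    intro q s cnt hq hf
    cases q with
    | nil =>
      rw [NR_nil]
      simp [floodLoop]
    | cons p rest =>
      obtain ⟨x, y⟩ := p
      rw [floodLoop, floodPush_spec land n m _ s rest cnt
        (nbrs_pairwise _ x y (Or.inr rfl))]
      set N := ([(x - 1, y), (x + 1, y), (x, y - 1), (x, y + 1)] :
        List (Int × Int)).filter (pvOk land n m (vOf s)) with hNdef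
      have hmem : ∀ c, c ∈ N ↔ StepR land n m (vOf s) (x, y) c :=
        fun c => memN_B land n m x y (vOf s) c
      have hnd : N.Nodup := (nbrs_pairwise _ x y (Or.inr rfl)).filter _
      have hNg : ∀ c ∈ N, InG n m c ∧ vOf s c.1 c.2 = false := by
        intro c hc
        have := (hmem c).mp hc
        exact ⟨this.2.1, this.2.2.2⟩
      have hvadd := vOf_addList s N
      have hq' : ∀ c ∈ N.reverse ++ rest, vOf (N.foldl PySem.Set.add s) c.1 c.2 = true := by
        intro c hc
        rw [hvadd]
        rcases List.mem_append.mp hc with h | h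
        · exact markList_true_of_mem (vOf s) N c (List.mem_reverse.mp h)
        · exact markList_true_of_true (vOf s) N c.1 c.2 (hq c (List.mem_cons_of_mem _ h))
      have hcnt := unvis_markList n m (vOf s) N hNg hnd
      have hfuel' : (N.reverse ++ rest).length + unvis n m (vOf (N.foldl PySem.Set.add s)) ≤
          fuel := by
        rw [hvadd]
        simp only [List.length_cons] at hf
        simp only [List.length_append, List.length_reverse]
        omega
      rw [ih (N.reverse ++ rest) (N.foldl PySem.Set.add s) (cnt + (N.length : Int)) hq' hfuel']
      have hNRq : NR land n m (vOf (N.foldl PySem.Set.add s)) (N.reverse ++ rest) =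
          NR land n m (markList (vOf s) N) (rest ++ N) := by
        rw [hvadd]
        exact NR_of_mem_iff land n m _ _ _
          (by intro c; simp only [List.mem_append, List.mem_reverse]; tauto)
      rw [hNRq]
      have hcard := NR_step_ncard land n m (vOf s) (x, y) rest N hq hmem hnd
      rw [hcard]
      push_cast
      ring

-- the seed cells of a column, in scan order
def SL (land : List (List Int)) (n col : Int) : List (Int × Int) :=
  ((PySem.List.pyRange 0 n 1).filter (fun r => decide (pvGet land r col = 1))).map
    (fun r => ((r, col) : Int × Int))

theorem seedCol_fold (land : List (List Int)) (col : Int) :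
    ∀ (rs : List Int) (s : PySem.Set (Int × Int)) (stk : List (Int × Int)),
    rs.Nodup → (∀ r ∈ rs, ((r, col) : Int × Int) ∉ s) →
    rs.foldl (fun st row =>
      if PySem.List.pyGetD (PySem.List.pyGetD land row []) col 0 = 1 then
        (PySem.Set.add st.1 (row, col), (row, col) :: st.2)
      else st) (s, stk) =
      (s ++ ((rs.filter (fun r => decide (pvGet land r col = 1))).map
          (fun r => ((r, col) : Int × Int))),
       (((rs.filter (fun r => decide (pvGet land r col = 1))).map
          (fun r => ((r, col) : Int × Int))).reverse ++ stk)) := by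
  intro rs
  induction rs with
  | nil =>
    intro s stk _ _
    simp
  | cons r rs ih =>
    intro s stk hnd hnotin
    obtain ⟨hr, hnd'⟩ := List.nodup_cons.mp hnd
    simp only [List.foldl_cons]
    by_cases hp : pvGet land r col = 1
    · rw [if_pos (show PySem.List.pyGetD (PySem.List.pyGetD land r []) col 0 = 1 from hp)]
      have hadd : PySem.Set.add s (r, col) = s ++ [((r, col) : Int × Int)] :=
        PySem.Set.add_of_not_mem (hnotin r List.mem_cons_self)
      rw [List.filter_cons_of_pos (by simp [hp])]
      rw [ih (PySem.Set.add s (r, col)) ((r, col) :: stk) hnd' ?hni]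
      case hni =>
        intro r' hr'
        rw [hadd]
        simp only [List.mem_append, List.mem_singleton, Prod.mk.injEq]
        rintro (h | ⟨h1, h2⟩)
        · exact hnotin r' (List.mem_cons_of_mem r hr') h
        · exact hr (h1 ▸ hr')
      rw [hadd]
      simp
    · rw [if_neg (show ¬ PySem.List.pyGetD (PySem.List.pyGetD land r []) col 0 = 1 from hp)]
      rw [List.filter_cons_of_neg (by simp [hp]), ih s stk hnd' 
        (fun r' hr' => hnotin r' (List.mem_cons_of_mem r hr'))]

theorem seedCol_spec (land : List (List Int)) (n col : Int) :
    seedCol land n col = (SL land n col, (SL land n col).reverse) := by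
  unfold seedCol SL
  rw [seedCol_fold land col (PySem.List.pyRange 0 n 1) PySem.Set.empty []
    (PySem.List.nodup_pyRange_one 0 n) (by intro r _ h; simp [PySem.Set.empty] at h)]
  simp [PySem.Set.empty]

theorem SL_nodup (land : List (List Int)) (n col : Int) : (SL land n col).Nodup := by
  unfold SL
  exact ((PySem.List.nodup_pyRange_one 0 n).filter _).map
    (fun a b hab => by simpa using congrArg Prod.fst hab)

theorem mem_SL (land : List (List Int)) (n col : Int) (a : Int × Int) :
    a ∈ SL land n col ↔ 0 ≤ a.1 ∧ a.1 < n ∧ a.2 = col ∧ pvGet land a.1 col = 1 := by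
  unfold SL
  simp only [List.mem_map, List.mem_filter, PySem.List.mem_pyRange_one,
    decide_eq_true_eq]
  constructor
  · rintro ⟨r, ⟨⟨h1, h2⟩, h3⟩, rfl⟩
    exact ⟨h1, h2, rfl, h3⟩
  · rintro ⟨h1, h2, h3, h4⟩
    exact ⟨a.1, ⟨⟨h1, h2⟩, h4⟩, by rw [← h3]⟩

-- the cells reachable from a column's seeds
def RSet (land : List (List Int)) (n m col : Int) : Set (Int × Int) :=
  {a | ∃ s ∈ SL land n col, Reach0 land n m s a}

theorem SL_oil (land : List (List Int)) (n m col : Int) (hcol : 0 ≤ col ∧ col < m) :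
    ∀ c ∈ SL land n col, OilC land n m c := by
  intro c hc
  obtain ⟨h1, h2, h3, h4⟩ := (mem_SL land n col c).mp hc
  exact ⟨⟨h1, h2, h3 ▸ hcol.1, h3 ▸ hcol.2⟩, h3 ▸ h4⟩

theorem seeds_NR_union (land : List (List Int)) (n m col : Int) (hcol : 0 ≤ col ∧ col < m) :
    {c | c ∈ SL land n col} ∪ NR land n m (vOf (SL land n col)) (SL land n col) =
      RSet land n m col := by
  ext a
  constructor
  · rintro (ha | ⟨hva, f, hf, hp⟩)
    · exact ⟨a, ha, Relation.ReflTransGen.refl⟩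
    · exact ⟨f, hf, StepR_reach land n m (vOf (SL land n col)) f a
        (SL_oil land n m col hcol f hf) hp⟩
  · rintro ⟨s, hs, hp⟩
    induction hp with
    | refl => exact Or.inl hs
    | @tail b a hsb hedge ih =>
      by_cases ha : a ∈ SL land n col
      · exact Or.inl ha
      · have hva : vOf (SL land n col) a.1 a.2 = false := by
          rw [vOf_false_iff]
          simpa using ha
        have hstep : StepR land n m (vOf (SL land n col)) b a :=
          ⟨hedge.1, hedge.2.2.1, hedge.2.2.2, hva⟩
        rcases ih with hb | ⟨hvb, f, hf, hpf⟩
        · exact Or.inr ⟨hva, b, hb, Relation.ReflTransGen.single hstep⟩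
        · exact Or.inr ⟨hva, f, hf, hpf.tail hstep⟩

theorem RSet_eq_TSet (land : List (List Int)) (n m col : Int) (hcol : 0 ≤ col ∧ col < m) :
    RSet land n m col = TSet land n m col := by
  ext a
  constructor
  · rintro ⟨s, hs, hp⟩
    have hsoil := SL_oil land n m col hcol s hs
    have haoil := oil_of_reach land n m s a hsoil hp
    refine ⟨haoil, (touches_iff_span land n m a col).mp ⟨s, Reach0_symm land n m s a hp, ?_⟩⟩
    exact ((mem_SL land n col s).mp hs).2.2.1
  · rintro ⟨hoa, hsp⟩
    obtain ⟨b, hb, hb2⟩ := (touches_iff_span land n m a col).mpr hsp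
    have hboil := oil_of_reach land n m a b hoa hb
    have hbSL : b ∈ SL land n col := by
      rw [mem_SL]
      exact ⟨hboil.1.1, hboil.1.2.1, hb2, hb2 ▸ hboil.2⟩
    exact ⟨b, hbSL, Reach0_symm land n m a b hb⟩

-- what one iteration of B's column loop computes
theorem colCount (land : List (List Int)) (n m col : Int) (hn : 0 ≤ n) (hm : 0 ≤ m)
    (hcol : 0 ≤ col ∧ col < m) :
    floodLoop land n m ((n * m).toNat + 1) (SL land n col) (SL land n col).reverse
      (((SL land n col).reverse.length : Int)) = ((TSet land n m col).ncard : Int) := by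
  set L := SL land n col with hL
  have hvm : ∀ c ∈ L, vOf L c.1 c.2 = true := by
    intro c hc
    simp [vOf, hc]
  have hq : ∀ c ∈ L.reverse, vOf L c.1 c.2 = true := by
    intro c hc
    exact hvm c (List.mem_reverse.mp hc)
  have hvL : vOf L = markList (fun _ _ => false) L := by
    funext i j
    apply bool_eq_of_iff
    rw [markList_spec]
    simp [vOf]
  have hLg : ∀ c ∈ L, InG n m c ∧ (fun (_ _ : Int) => false) c.1 c.2 = false := by
    intro c hc
    exact ⟨(SL_oil land n m col hcol c hc).1, rfl⟩
  have hcnt := unvis_markList n m (fun _ _ => false) L hLg (SL_nodup land n col)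
  have hle := unvis_le n m (fun _ _ => false) hn hm
  have hf : L.reverse.length + unvis n m (vOf L) ≤ (n * m).toNat + 1 := by
    rw [hvL, List.length_reverse]
    omega
  rw [floodLoop_spec land n m ((n * m).toNat + 1) L.reverse L
    ((L.reverse.length : Int)) hq hf]
  rw [NR_of_mem_iff land n m (vOf L) L.reverse L (by intro c; exact List.mem_reverse)]
  have hdisj : Disjoint {c | c ∈ L} (NR land n m (vOf L) L) := by
    rw [Set.disjoint_left]
    rintro c hc ⟨hvc, _⟩
    rw [hvm c hc] at hvc
    exact absurd hvc (by simp)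
  have hcard : (RSet land n m col).ncard =
      L.length + (NR land n m (vOf L) L).ncard := by
    rw [← seeds_NR_union land n m col hcol]
    rw [Set.ncard_union_eq hdisj (List.finite_toSet L) (NR_finite land n m _ _ hvm)]
    congr 1
    have : {c | c ∈ L} = (↑L.toFinset : Set (Int × Int)) := by
      ext c; simp
    rw [this, Set.ncard_coe_finset, List.toFinset_card_of_nodup (SL_nodup land n col)]
  rw [← RSet_eq_TSet land n m col hcol, hcard, List.length_reverse]
  push_cast
  ring

-- ===== VERDICT (by name: the statement is the Claim_ definition above) =====
theorem max_body_eq (b c : Int) : (if b < c then c else b) = max b c := by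
  rcases lt_or_ge b c with h | h
  · rw [if_pos h, max_eq_right (le_of_lt h)]
  · rw [if_neg (not_lt.mpr h), max_eq_left h]

theorem solution_spec : Claim_equal_solution := by
  intro land _ hpre
  obtain ⟨hne, hhd, _⟩ := hpre
  unfold Spec_solution
  simp only [solution, solution_alt]
  set n : Int := (land.length : Int) with hn'
  set m : Int := ((PySem.List.pyGetD land 0 ([] : List Int)).length : Int) with hm'
  have hn : 0 ≤ n := by positivity
  have hm0 : 0 ≤ m := by positivity
  have hm : 0 < m := by
    cases land with
    | nil => exact absurd rfl hne
    | cons r0 rest =>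
      have hr0 : PySem.List.pyGetD (r0 :: rest) 0 ([] : List Int) = r0 := by
        rw [PySem.List.pyGetD_zero]
        rfl
      have hr0ne : r0 ≠ [] := by simpa using hhd
      rw [hm', hr0]
      exact_mod_cast List.length_pos_of_ne_nil hr0ne
  obtain ⟨hlenA, hgetA⟩ := A_fold_spec land n m hn hm0
  set fin := (PySem.List.pyRange 0 n 1).foldl
    (fun st x => (PySem.List.pyRange 0 m 1).foldl (fun st y => bfsCellA land n m st x y) st)
    (fun _ _ => false, List.replicate m.toNat 0) with hfin
  -- A's oils list is the per-column count table
  have hlist : fin.2 = (PySem.List.pyRange 0 m 1).map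
      (fun k => ((TSet land n m k).ncard : Int)) := by
    apply List.ext_getElem
    · rw [hlenA, List.length_map, PySem.List.length_pyRange_one]
      omega
    · intro i h1 h2
      rw [List.getElem_map, PySem.List.getElem_pyRange_one]
      rw [← List.getD_eq_getElem fin.2 0 h1]
      rw [hgetA i (by rw [hlenA] at h1; exact h1)]
      norm_num
  -- B's column loop is the running max of the same table
  have hB : (PySem.List.pyRange 0 m 1).foldl
      (fun best col =>
        let sd := seedCol land n col
        let count := floodLoop land n m ((n * m).toNat + 1) sd.1 sd.2 ((sd.2.length : Int))
        if best < count then count else best) 0 =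
      ((PySem.List.pyRange 0 m 1).map
        (fun k => ((TSet land n m k).ncard : Int))).foldl max 0 := by
    rw [List.foldl_map]
    apply PySem.List.foldl_congr_mem
    intro acc col hcol
    obtain ⟨h1, h2⟩ := PySem.List.mem_pyRange_one.mp hcol
    dsimp only
    rw [seedCol_spec land n col]
    rw [colCount land n m col hn hm0 ⟨h1, h2⟩]
    exact max_body_eq acc _
  rw [hB, hlist]
  have hcons : PySem.List.pyRange 0 m 1 = 0 :: PySem.List.pyRange 1 m 1 := by
    rw [PySem.List.pyRange_one_cons hm]
    norm_num
  rw [hcons, List.map_cons]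
  rw [PySem.List.max?_id_cons]
  simp only [Option.getD_some, List.foldl_cons]
  rw [max_eq_right (by positivity : (0 : Int) ≤ ((TSet land n m 0).ncard : Int))]
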